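-- pv_equiv track=rewrite | github.com/Alset-Nikolas/ClassicDataStructures | HeapBinary.py | get_rout_parent
-- ===== SOURCE A (Python) =====
-- def get_rout_parent(m: int)-> list[int]:
--     '''
--         Функция возвращает путь от корня до родителя m
--     :param m:
--     :return:
--     '''
--     if m // 2 == 0:
--         last_el = 1
--     else:
--         last_el = m // 2
--     parents_rout = []
--     while last_el != 1:
--         parents_rout.append(last_el)
--         last_el //= 2
--     return parents_rout[::-1]
-- ===== SOURCE B (Python) =====
-- def get_rout_parent(m: int) -> list[int]:
--     '''Path from the root to the parent of m, read off m's binary representation.'''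
--     return [m >> k for k in range(m.bit_length() - 2, 0, -1)]
-- ===== Notes on version B (the rewrite author's own statement) =====
-- stated objective: idiomatic
-- what changed: B reads the root-to-parent path directly off the binary representation of m (each ancestor is a prefix m >> k, emitted in forward order by a single comprehension over range(m.bit_length()-2, 0, -1)), replacing A's mutable-accumulator halving while-loop followed by a [::-1] reversal; Pre_ excludes m < 0, where A's while-loop never terminates.
import Mathlib
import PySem

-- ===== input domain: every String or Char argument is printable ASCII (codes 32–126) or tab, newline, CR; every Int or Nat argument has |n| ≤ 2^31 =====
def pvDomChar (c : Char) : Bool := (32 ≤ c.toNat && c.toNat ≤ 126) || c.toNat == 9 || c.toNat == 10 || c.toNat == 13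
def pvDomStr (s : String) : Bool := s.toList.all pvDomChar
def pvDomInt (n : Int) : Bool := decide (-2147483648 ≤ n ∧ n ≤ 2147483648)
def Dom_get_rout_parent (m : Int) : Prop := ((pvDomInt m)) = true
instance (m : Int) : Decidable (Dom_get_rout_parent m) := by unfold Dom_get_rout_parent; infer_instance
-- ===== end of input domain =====

-- B reads the root-to-parent path directly off the binary prefixes m >> k of m (one forward
-- comprehension over a countdown range), instead of A's halving while-loop + [::-1] reversal;
-- Pre_ excludes m < 0, where A's while-loop never terminates.


-- ===== PORT A =====
-- the while-loop: 'while last_el != 1: parents_rout.append(last_el); last_el //= 2'.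
-- Under Pre_ (0 ≤ m) last_el is always ≥ 1, so the state fits in a Nat and 'l = 0' is
-- unreachable; the guard 'l ≤ 1' (instead of 'l = 1') only makes the recursion total.
def pvALoop (l : Nat) (acc : List Int) : List Int :=
  if l ≤ 1 then acc else pvALoop (l / 2) (acc ++ [(l : Int)])
termination_by l
decreasing_by exact Nat.div_lt_self (by omega) (by omega)

def get_rout_parent (m : Int) : List Int :=
  let last_el : Int := if PySem.Int.floordiv m 2 = 0 then 1 else PySem.Int.floordiv m 2
  -- '.toNat' is exact under Pre_ (last_el ≥ 1 there); 'parents_rout[::-1]' is List.reverse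
  (pvALoop last_el.toNat []).reverse

-- ===== PORT B =====
-- Source B: return [m >> k for k in range(m.bit_length() - 2, 0, -1)]
-- 'm >> k' is Int.shiftRight m k.toNat (arithmetic shift, exact for Python '>>'; every k
-- produced by the range is ≥ 1, so '.toNat' is exact)
def get_rout_parent_alt (m : Int) : List Int :=
  (PySem.List.pyRange ((PySem.Int.bitLength m : Int) - 2) 0 (-1)).map
    (fun k => Int.shiftRight m k.toNat)

-- ===== PRECONDITION & SPEC =====
-- Pre_ excludes m < 0: there A's while-loop never terminates (last_el stays negative), so A
-- returns no value on those inputs.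
def Pre_get_rout_parent (m : Int) : Prop := 0 ≤ m
instance (m : Int) : Decidable (Pre_get_rout_parent m) := by unfold Pre_get_rout_parent; infer_instance
def pvWitness_get_rout_parent : Int := 12

def Spec_get_rout_parent (m : Int) (out : List Int) : Prop := out = get_rout_parent_alt m
instance (m : Int) (out : List Int) : Decidable (Spec_get_rout_parent m out) := by unfold Spec_get_rout_parent; infer_instance

-- ===== CLAIM (what is proved, stated in full; the proofs are below) =====
def Claim_equal_get_rout_parent : Prop := ∀ (m : Int), Dom_get_rout_parent m → Pre_get_rout_parent m → Spec_get_rout_parent m (get_rout_parent m)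

-- ===== LEMMAS AND PROOFS =====

-- the value list A's loop produces from state l, in the order appended: [l, l/2, …, 2]
def pvChain (l : Nat) : List Int :=
  (List.range (PySem.Int.bitLength (l : Int) - 1)).map (fun j => ((l >>> j : Nat) : Int))

theorem pvChain_step {l : Nat} (h : 2 ≤ l) : pvChain l = (l : Int) :: pvChain (l / 2) := by
  have hbl : PySem.Int.bitLength (l : Int) = PySem.Int.bitLength ((l / 2 : Nat) : Int) + 1 :=
    PySem.Int.bitLength_natCast (by omega)
  have hbl2 : 1 ≤ PySem.Int.bitLength ((l / 2 : Nat) : Int) := by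
    have := PySem.Int.bitLength_natCast (m := l / 2) (by omega)
    omega
  have hlen : PySem.Int.bitLength (l : Int) - 1
      = (PySem.Int.bitLength ((l / 2 : Nat) : Int) - 1) + 1 := by omega
  rw [pvChain, hlen, List.range_succ_eq_map, List.map_cons, List.map_map]
  simp only [Nat.shiftRight_zero]
  refine congrArg _ ?_
  rw [pvChain]
  refine List.map_congr_left ?_
  intro j _
  simp only [Function.comp, Nat.succ_eq_add_one]
  have h2 : l >>> (j + 1) = (l / 2) >>> j := by
    rw [Nat.add_comm j 1, Nat.shiftRight_add, Nat.shiftRight_one]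
  exact_mod_cast h2

theorem pvChain_one : pvChain 1 = [] := by decide

theorem pvALoop_eq_chain : ∀ (l : Nat), 1 ≤ l → ∀ acc, pvALoop l acc = acc ++ pvChain l := by
  intro l
  induction l using Nat.strong_induction_on with
  | _ l ih =>
    intro hl acc
    by_cases h : l ≤ 1
    · have : l = 1 := by omega
      subst this
      rw [pvALoop, if_pos (by omega), pvChain_one, List.append_nil]
    · rw [pvALoop, if_neg h]
      rw [ih (l / 2) (Nat.div_lt_self (by omega) (by omega)) (by omega)]
      rw [pvChain_step (l := l) (by omega)]
      simp

-- ===== VERDICT (by name: the statement is the Claim_ definition above) =====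
theorem get_rout_parent_spec : Claim_equal_get_rout_parent := by
  intro m _ hpre
  unfold Spec_get_rout_parent get_rout_parent get_rout_parent_alt
  obtain ⟨n, rfl⟩ : ∃ n : Nat, m = (n : Int) := ⟨m.toNat, (Int.toNat_of_nonneg hpre).symm⟩
  have hfd : PySem.Int.floordiv (n : Int) 2 = ((n / 2 : Nat) : Int) := by
    rw [PySem.Int.floordiv_eq_ediv_of_pos (by norm_num)]
    exact_mod_cast rfl
  -- rewrite B into reversed forward form
  rw [PySem.List.pyRange_neg_one_eq_reverse, List.map_reverse]
  rw [show ((0 : Int) + 1) = 1 by norm_num,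
      show ((PySem.Int.bitLength (n : Int) : Int) - 2 + 1)
         = ((PySem.Int.bitLength (n : Int) : Int) - 1) by ring]
  rw [PySem.List.pyRange_one, List.map_map]
  by_cases hn : n ≤ 1
  · -- m ∈ {0,1}: both sides are []
    have h0 : PySem.Int.floordiv (n : Int) 2 = 0 := by
      rw [hfd, Nat.div_eq_of_lt (by omega)]; rfl
    have hbl1 : PySem.Int.bitLength (n : Int) ≤ 1 := by interval_cases n <;> decide
    have hr : ((PySem.Int.bitLength (n : Int) : Int) - 1 - 1).toNat = 0 := by omega
    rw [h0]
    norm_num [hr]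
    rw [pvALoop]
    norm_num
  · -- n ≥ 2: the loop runs from last_el = n/2 ≥ 1
    have hq : ¬ ((n / 2 : Nat) : Int) = 0 := by
      simp only [Int.natCast_eq_zero]; omega
    simp only [hfd, if_neg hq, Int.toNat_natCast]
    rw [pvALoop_eq_chain (n / 2) (by omega) [], List.nil_append]
    refine congrArg List.reverse ?_
    -- chain (n/2) = map (fun k => n >>> (1+k)) (range (bl n - 2))
    have hbl : PySem.Int.bitLength (n : Int) = PySem.Int.bitLength ((n / 2 : Nat) : Int) + 1 :=
      PySem.Int.bitLength_natCast (by omega)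
    have hbl2 : 1 ≤ PySem.Int.bitLength ((n / 2 : Nat) : Int) := by
      have := PySem.Int.bitLength_natCast (m := n / 2) (by omega)
      omega
    have hlen : ((PySem.Int.bitLength (n : Int) : Int) - 1 - 1).toNat
        = PySem.Int.bitLength ((n / 2 : Nat) : Int) - 1 := by omega
    rw [pvChain, hlen]
    refine List.map_congr_left ?_
    intro j _
    simp only [Function.comp]
    have h1 : ((1 : Int) + (j : Nat)).toNat = j + 1 := by omega
    rw [h1]
    have h2 : n >>> (j + 1) = (n / 2) >>> j := by
      rw [Nat.add_comm j 1, Nat.shiftRight_add, Nat.shiftRight_one]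
    rw [show Int.shiftRight ((n : Nat) : Int) (j + 1) = ((n >>> (j + 1) : Nat) : Int) from rfl, h2]
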